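-- pv_equiv track=rewrite | github.com/PdxCodeGuild/class_koi | code/matt/python/lab09.py | graph_gen
-- ===== SOURCE A (Python) =====
-- def graph_gen(input):
--     # determine lowest and highest values in dataset
--     low = input[0]
--     high = 0
--     for x in range(len(input)):
--         if input[x] < low:
--             low = input[x]
--         elif input[x] > high:
--             high = input[x]
--     # generate graph dictionary with keys
--     graph = {}
--     for x in range(low, high + 1):\
--         graph[x] = []
--     # variable to count water added later
--     water = 0
--     # iterate through graph rows
--     for row in graph:
--         # iterate through digits in each row
--         for digit in input:
--             # append an 'X' if the value is greater than or equal to row value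
--             if digit >= row:
--                 graph[row].append('X')
--             # append a ' ' if the value is less than row value
--             else:
--                 graph[row].append(' ')
--         # iterate through columns in graph and add water ('O') where needed
--         for x in range(len(graph[row])):
--             # ignore current 'X' locations
--             if graph[row][x] == 'X':
--                 continue
--             # if there is an 'X' to the left and right, change to 'O'
--             elif 'X' in graph[row][:x] and 'X' in graph[row][x + 1:]:
--                 graph[row][x] = 'O'
--                 water += 1
--         graph[row] = ' '.join(graph[row])
--     # generate multiline string from graph dictionary
--     graph_str =''
--     i = high
--     # add each row except with new line
--     while i > low:
--         graph_str += graph[i] + '\n'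
--         i -= 1
--     # add last row
--     graph_str += graph[i]
--
--
--     return graph_str, water
-- ===== SOURCE B (Python) =====
-- def graph_gen(input):
--     lo = min(input)
--     hi = max(0, max(input))
--     water = 0
--     rows = []
--     for r in range(hi, lo - 1, -1):
--         mask = [v >= r for v in input]
--         if True in mask:
--             L = mask.index(True)
--             R = len(mask) - 1 - mask[::-1].index(True)
--         else:
--             L = R = -1
--         chars = []
--         for x, m in enumerate(mask):
--             if m:
--                 chars.append('X')
--             elif L <= x <= R:
--                 chars.append('O')
--                 water += 1
--             else:
--                 chars.append(' ')
--         rows.append(' '.join(chars))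
--     return '\n'.join(rows), water
-- ===== Notes on version B (the rewrite author's own statement) =====
-- stated objective: faster
-- what changed: B replaces A's dict of rows and its per-row quadratic scans ('X' in row[:x] and 'X' in row[x+1:] for every column) by computing each row's leftmost and rightmost bar index once (mask.index) and classifying every cell in a single pass, building the row strings top-down directly.
-- outside the precondition, e.g. on graph_gen([]): A raises IndexError, B raises ValueError
import Mathlib
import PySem

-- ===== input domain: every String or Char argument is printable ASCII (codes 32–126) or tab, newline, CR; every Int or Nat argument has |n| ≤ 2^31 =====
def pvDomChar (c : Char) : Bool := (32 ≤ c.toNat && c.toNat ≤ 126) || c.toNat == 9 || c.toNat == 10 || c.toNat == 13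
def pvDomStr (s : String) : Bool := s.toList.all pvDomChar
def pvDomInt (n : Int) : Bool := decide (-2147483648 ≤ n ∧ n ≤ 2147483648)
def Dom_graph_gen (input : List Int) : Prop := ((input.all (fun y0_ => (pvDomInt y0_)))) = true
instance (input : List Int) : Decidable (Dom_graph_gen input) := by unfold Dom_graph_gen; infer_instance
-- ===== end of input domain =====

-- B replaces A's per-row quadratic prefix/suffix membership scans by the leftmost/rightmost
-- bar index of each row (objective: faster). Equivalence is proved on nonempty inputs
-- (A raises IndexError on [], B raises ValueError there).

-- ===== PORT A =====

-- the final 'while i > low' loop of A; fuel = (i - low).toNat exactly counts its iterations,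
-- after which A appends graph[low] without a newline
def pvWhileA (graph : PySem.Dict Int (List Char)) : Nat → Int → List Char → List Char
  | 0, i, acc => acc ++ graph.getD i []
  | n + 1, i, acc => pvWhileA graph n (i - 1) (acc ++ graph.getD i [] ++ ['\n'])

-- rows are kept as List Char throughout (Python's list of 1-char strings, then the
-- ' '-joined string); the returned ''.join result is wrapped by String.ofList at the end
def graph_gen (input : List Int) : String × Int :=
  let low0 := (input.head?).getD 0   -- input[0]; [] raises IndexError, excluded by Pre_
  let lh := (PySem.List.pyRange 0 (PySem.List.len input) 1).foldl
      (fun (p : Int × Int) x =>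
        if PySem.List.pyGetD input x 0 < p.1 then (PySem.List.pyGetD input x 0, p.2)
        else if PySem.List.pyGetD input x 0 > p.2 then (p.1, PySem.List.pyGetD input x 0)
        else p)
      (low0, 0)
  let graph0 : PySem.Dict Int (List Char) :=
    (PySem.List.pyRange lh.1 (lh.2 + 1) 1).foldl (fun d x => d.insert x []) PySem.Dict.empty
  let gw := graph0.keys.foldl
      (fun (st : PySem.Dict Int (List Char) × Int) row =>
        let cs0 := input.foldl
            (fun acc digit => if digit ≥ row then acc ++ ['X'] else acc ++ [' '])
            (st.1.getD row [])
        let cw := (PySem.List.pyRange 0 (PySem.List.len cs0) 1).foldl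
            (fun (q : List Char × Int) x =>
              if PySem.List.pyGetD q.1 x ' ' = 'X' then q
              else if (PySem.List.slice q.1 none (some x)).contains 'X'
                      && (PySem.List.slice q.1 (some (x + 1)) none).contains 'X' then
                (PySem.List.pySetD q.1 x 'O', q.2 + 1)
              else q)
            (cs0, st.2)
        (st.1.insert row (PySem.Chars.join [' '] (cw.1.map (fun c => [c]))), cw.2))
      (graph0, 0)
  let gs := pvWhileA gw.1 ((lh.2 - lh.1).toNat) lh.2 []
  (String.ofList gs, gw.2)

-- ===== PORT B =====
def graph_gen_alt (input : List Int) : String × Int :=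
  let lo := ((PySem.List.min? input id).getD 0)
  let hi := max 0 ((PySem.List.max? input id).getD 0)
  let st := (PySem.List.pyRange hi (lo - 1) (-1)).foldl
      (fun (st : List (List Char) × Int) r =>
        let mask := input.map (fun v => decide (v ≥ r))
        let LR : Int × Int :=
          if mask.contains true then
            (((PySem.List.index? mask true).getD 0 : Nat),
             PySem.List.len mask - 1 - ((PySem.List.index? mask.reverse true).getD 0 : Nat))
          else (-1, -1)
        let cw := (PySem.List.enumerate mask 0).foldl
            (fun (q : List Char × Int) p =>
              if p.2 then (q.1 ++ ['X'], q.2)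
              else if LR.1 ≤ p.1 ∧ p.1 ≤ LR.2 then (q.1 ++ ['O'], q.2 + 1)
              else (q.1 ++ [' '], q.2))
            ([], st.2)
        (st.1 ++ [PySem.Chars.join [' '] (cw.1.map (fun c => [c]))], cw.2))
      ([], 0)
  (String.ofList (PySem.Chars.join ['\n'] st.1), st.2)

-- ===== PRECONDITION & SPEC =====
-- A raises IndexError on the empty list (input[0]); B raises ValueError there (min([]))
def Pre_graph_gen (input : List Int) : Prop := input ≠ []
instance (input : List Int) : Decidable (Pre_graph_gen input) := by unfold Pre_graph_gen; infer_instance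
def pvWitness_graph_gen : List Int := [2, 0, 3]

def Spec_graph_gen (input : List Int) (out : String × Int) : Prop := out = graph_gen_alt input
instance (input : List Int) (out : String × Int) : Decidable (Spec_graph_gen input out) := by unfold Spec_graph_gen; infer_instance

-- ===== CLAIM (what is proved, stated in full; the proofs are below) =====
def Claim_equal_graph_gen : Prop := ∀ (input : List Int), Dom_graph_gen input → Pre_graph_gen input → Spec_graph_gen input (graph_gen input)

-- ===== LEMMAS AND PROOFS =====

-- ---- proof-only row specifications ----

-- the bar row for threshold r ('X' where the value reaches r)
def pvRowO (input : List Int) (r : Int) : List Char :=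
  input.map (fun d => if d ≥ r then 'X' else ' ')

-- the row after A's water pass: a blank becomes 'O' iff an 'X' lies on both sides
def pvF (o : List Char) : List Char :=
  o.mapIdx (fun j c => if c = 'X' then 'X'
    else if 'X' ∈ o.take j ∧ 'X' ∈ o.drop (j + 1) then 'O' else ' ')

def pvRow (input : List Int) (r : Int) : List Char :=
  PySem.Chars.join [' '] ((pvF (pvRowO input r)).map (fun c => [c]))

def pvW (input : List Int) (r : Int) : Int :=
  (((pvF (pvRowO input r)).count 'O' : Nat) : Int)

-- ---- extrema ----

lemma pv_foldl_min_le (t : List Int) : ∀ (a : Int), t.foldl min a ≤ a ∧ ∀ y ∈ t, t.foldl min a ≤ y := by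
  induction t with
  | nil => intro a; simp
  | cons x xs ih =>
    intro a
    have h := ih (min a x)
    refine ⟨le_trans h.1 (min_le_left _ _), ?_⟩
    intro y hy
    rcases List.mem_cons.1 hy with rfl | hy
    · exact le_trans h.1 (min_le_right _ _)
    · exact h.2 y hy
lemma pv_foldl_max_max (t : List Int) : ∀ (a b : Int), t.foldl max (max a b) = max a (t.foldl max b) := by
  induction t with
  | nil => intro a b; simp
  | cons x xs ih =>
    intro a b
    simp only [List.foldl_cons]
    rw [max_assoc, ih]
lemma pv_lowhigh_aux (xs : List Int) :
    ∀ (lo hi : Int), lo ≤ hi →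
      xs.foldl (fun (p : Int × Int) v => if v < p.1 then (v, p.2) else if v > p.2 then (p.1, v) else p) (lo, hi)
        = (xs.foldl min lo, xs.foldl max hi) := by
  induction xs with
  | nil => intro lo hi h; simp
  | cons x xs ih =>
    intro lo hi h
    simp only [List.foldl_cons]
    by_cases h1 : x < lo
    · simp only [if_pos h1]
      rw [ih x hi (le_trans h1.le h)]
      rw [min_eq_right h1.le, max_eq_left (le_trans h1.le h)]
    · simp only [if_neg h1]
      rw [not_lt] at h1
      by_cases h2 : x > hi
      · simp only [if_pos h2]
        rw [ih lo x (le_trans h h2.le)]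
        rw [min_eq_left h1, max_eq_right h2.le]
      · simp only [if_neg h2]
        rw [not_lt] at h2
        rw [ih lo hi h, min_eq_left h1, max_eq_left h2]
lemma pv_lowhigh (x : Int) (xs : List Int) :
    (x :: xs).foldl (fun (p : Int × Int) v => if v < p.1 then (v, p.2) else if v > p.2 then (p.1, v) else p) (x, 0)
      = (xs.foldl min x, max 0 (xs.foldl max x)) := by
  simp only [List.foldl_cons, lt_irrefl, if_false]
  by_cases hx : x > 0
  · rw [if_pos hx, pv_lowhigh_aux xs x x le_rfl]
    have : 0 < xs.foldl max x := lt_of_lt_of_le hx (PySem.List.le_foldl_max xs x).1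
    rw [max_eq_right this.le]
  · rw [if_neg hx]
    rw [not_lt] at hx
    rw [pv_lowhigh_aux xs x 0 hx]
    have : xs.foldl max 0 = max 0 (xs.foldl max x) := by
      rw [← pv_foldl_max_max, max_eq_left hx]
    rw [this]
lemma pv_minfold (f : Option Int → Int → Option Int)
    (hf : ∀ m x, f (some m) x = if x < m then some x else some m) (xs : List Int) :
    ∀ m, xs.foldl f (some m) = some (xs.foldl min m) := by
  induction xs with
  | nil => intro m; simp
  | cons x xs ih =>
    intro m
    rw [List.foldl_cons, List.foldl_cons, hf]
    by_cases h : x < m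
    · rw [if_pos h, ih, min_eq_right h.le]
    · rw [if_neg h, ih, min_eq_left (not_lt.1 h)]

lemma pv_min?_cons (x : Int) (xs : List Int) : PySem.List.min? (x :: xs) id = some (xs.foldl min x) := by
  simp only [PySem.List.min?, List.foldl_cons]
  exact pv_minfold _ (fun _ _ => rfl) xs x
lemma pv_maxfold (f : Option Int → Int → Option Int)
    (hf : ∀ m x, f (some m) x = if m < x then some x else some m) (xs : List Int) :
    ∀ m, xs.foldl f (some m) = some (xs.foldl max m) := by
  induction xs with
  | nil => intro m; simp
  | cons x xs ih =>
    intro m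
    rw [List.foldl_cons, List.foldl_cons, hf]
    by_cases h : m < x
    · rw [if_pos h, ih, max_eq_right h.le]
    · rw [if_neg h, ih, max_eq_left (not_lt.1 h)]

lemma pv_max?_cons (x : Int) (xs : List Int) : PySem.List.max? (x :: xs) id = some (xs.foldl max x) := by
  simp only [PySem.List.max?, List.foldl_cons]
  exact pv_maxfold _ (fun _ _ => rfl) xs x
-- ---- the empty-rows dictionary ----

lemma pv_keys_range (lo hi : Int) :
    ((PySem.List.pyRange lo hi 1).foldl (fun d x => d.insert x ([] : List Char)) PySem.Dict.empty).keys
      = PySem.List.pyRange lo hi 1 := by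
  rw [show (fun (d : PySem.Dict Int (List Char)) (x : Int) => d.insert x ([] : List Char))
        = (fun d x => d.insert x ((fun (_ : PySem.Dict Int (List Char)) (_ : Int) => ([] : List Char)) d x)) from rfl,
      PySem.Dict.keys_foldl_insert]
  simp only [PySem.Dict.keys_empty]
  rw [PySem.Set.update_nil_left]
  exact PySem.Set.ofList_eq_self_of_nodup _ (PySem.List.nodup_pyRange_one lo hi)
lemma pv_graph0_getD (l : List Int) :
    ∀ (d : PySem.Dict Int (List Char)), (∀ j, d.getD j [] = []) →
      ∀ j, (l.foldl (fun d x => d.insert x ([] : List Char)) d).getD j [] = [] := by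
  induction l with
  | nil => intro d hd j; exact hd j
  | cons x xs ih =>
    intro d hd j
    simp only [List.foldl_cons]
    refine ih _ ?_ j
    intro j'
    rw [PySem.Dict.getD_insert]
    split <;> simp [hd]
-- ---- the water pass ----

lemma pv_F_length (o : List Char) : (pvF o).length = o.length := by
  simp [pvF]

lemma pv_F_getElem (o : List Char) (j : Nat) (hj : j < o.length) :
    (pvF o)[j]'(by simpa [pv_F_length] using hj)
      = (if o[j] = 'X' then 'X' else if 'X' ∈ o.take j ∧ 'X' ∈ o.drop (j + 1) then 'O' else ' ') := by
  simp [pvF]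

lemma pv_getElem_idx_congr {α : Type} (l : List α) {i j : Nat} (h : i = j) (hi : i < l.length) :
    l[i]'hi = l[j]'(h ▸ hi) := by subst h; rfl

lemma pv_mem_take_F (o : List Char) (k : Nat) :
    'X' ∈ (pvF o).take k ↔ 'X' ∈ o.take k := by
  rw [List.mem_take_iff_getElem, List.mem_take_iff_getElem]
  constructor
  · rintro ⟨j, hj, hje⟩
    rw [pv_F_length] at hj
    refine ⟨j, hj, ?_⟩
    have hj' : j < o.length := lt_of_lt_of_le hj (min_le_right _ _)
    rw [pv_F_getElem o j hj'] at hje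
    by_contra hne
    rw [if_neg hne] at hje
    split at hje <;> simp_all
  · rintro ⟨j, hj, hje⟩
    have hj' : j < o.length := lt_of_lt_of_le hj (min_le_right _ _)
    have hb : j < min k (pvF o).length := by rw [pv_F_length]; exact hj
    exact ⟨j, hb, by rw [pv_F_getElem o j hj', hje, if_pos rfl]⟩
lemma pv_water_aux (o : List Char) (ho : ∀ c ∈ o, c = 'X' ∨ c = ' ') :
    ∀ (m k : Nat) (w : Int), k + m = o.length →
      (PySem.List.pyRange (k : Int) (o.length : Int) 1).foldl
          (fun (q : List Char × Int) x =>
            if PySem.List.pyGetD q.1 x ' ' = 'X' then q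
            else if (PySem.List.slice q.1 none (some x)).contains 'X'
                    && (PySem.List.slice q.1 (some (x + 1)) none).contains 'X' then
              (PySem.List.pySetD q.1 x 'O', q.2 + 1)
            else q)
          ((pvF o).take k ++ o.drop k, w)
        = (pvF o, w + ((((pvF o).drop k).count 'O' : Nat) : Int)) := by
  intro m
  induction m with
  | zero =>
    intro k w hk
    simp only [Nat.add_zero] at hk
    subst hk
    rw [PySem.List.pyRange_one_eq_nil (by omega)]
    rw [List.take_of_length_le (le_of_eq (pv_F_length o)), List.drop_of_length_le le_rfl,
        List.drop_of_length_le (le_of_eq (pv_F_length o))]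
    simp
  | succ m ih =>
    intro k w hk
    have hklen : k < o.length := by omega
    have hFlen : (pvF o).length = o.length := pv_F_length o
    have htk : ((pvF o).take k).length = k := by
      rw [List.length_take]; omega
    have hdropc : o.drop k = o[k] :: o.drop (k + 1) := List.drop_eq_getElem_cons hklen
    set T := (pvF o).take k with hT
    have hl : (pvF o).take k ++ o.drop k = T ++ o[k] :: o.drop (k + 1) := by rw [hdropc]
    rw [PySem.List.pyRange_one_cons (by exact_mod_cast hklen), List.foldl_cons]
    -- evaluate one step
    have hget : PySem.List.pyGetD (T ++ o[k] :: o.drop (k + 1)) (k : Int) ' ' = o[k] := by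
      rw [PySem.List.pyGetD_natCast]
      rw [List.getD_eq_getElem?_getD, List.getElem?_append_right (by omega)]
      simp [htk, List.getElem?_eq_getElem hklen]
    have hslice1 : PySem.List.slice (T ++ o[k] :: o.drop (k + 1)) none (some (k : Int)) = T := by
      rw [PySem.List.slice_to_natCast, List.take_left' htk]
    have hslice2 : PySem.List.slice (T ++ o[k] :: o.drop (k + 1)) (some ((k : Int) + 1)) none = o.drop (k + 1) := by
      have hc : ((k : Int) + 1) = ((k + 1 : Nat) : Int) := by push_cast; ring
      rw [hc, PySem.List.slice_from_natCast]
      have hsplit : T ++ o[k] :: o.drop (k + 1) = (T ++ [o[k]]) ++ o.drop (k + 1) := by simp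
      have hlen2 : (T ++ [o[k]]).length = k + 1 := by simp [htk]
      rw [hsplit, ← hlen2, List.drop_left]
    have hFk : (pvF o)[k]'(by omega)
        = (if o[k] = 'X' then 'X' else if 'X' ∈ o.take k ∧ 'X' ∈ o.drop (k + 1) then 'O' else ' ') :=
      pv_F_getElem o k hklen
    have htksucc : (pvF o).take (k + 1) = T ++ [(pvF o)[k]'(by omega)] := by
      rw [hT, List.take_add_one]
      simp [List.getElem?_eq_getElem (by omega : k < (pvF o).length)]
    have hdropF : (pvF o).drop k = (pvF o)[k]'(by omega) :: (pvF o).drop (k + 1) :=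
      List.drop_eq_getElem_cons (by omega)
    have hcnt : ((pvF o).drop k).count 'O'
        = (if (pvF o)[k]'(by omega) = 'O' then 1 else 0) + ((pvF o).drop (k + 1)).count 'O' := by
      rw [hdropF, List.count_cons]
      rcases Decidable.em ((pvF o)[k]'(by omega) = 'O') with h | h
      · simp [h]
        omega
      · simp [h]
    rw [hl]
    have hcast : ((k : Int) + 1) = ((k + 1 : Nat) : Int) := by push_cast; ring
    by_cases hX : o[k] = 'X'
    · -- the cell is an 'X': nothing happens
      rw [if_pos (by rw [hget, hX])]
      have hFkX : (pvF o)[k]'(by omega) = 'X' := by rw [hFk, if_pos hX]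
      have hstate : T ++ o[k] :: o.drop (k + 1) = (pvF o).take (k + 1) ++ o.drop (k + 1) := by
        rw [htksucc, hFkX, hX]; simp
      rw [hstate, hcast, ih (k + 1) w (by omega)]
      rw [hcnt, hFkX]
      norm_num
    · have ho' : o[k] = ' ' := by
        rcases ho o[k] (List.getElem_mem hklen) with h | h
        · exact absurd h hX
        · exact h
      rw [if_neg (by rw [hget, ho']; decide)]
      rw [hslice1, hslice2]
      by_cases hcond : 'X' ∈ o.take k ∧ 'X' ∈ o.drop (k + 1)
      · have hb : (T.contains 'X' && (o.drop (k + 1)).contains 'X') = true := by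
          rw [Bool.and_eq_true]
          constructor
          · rw [List.contains_iff_mem, hT, pv_mem_take_F o k]; exact hcond.1
          · rw [List.contains_iff_mem]; exact hcond.2
        rw [if_pos hb]
        have hFkO : (pvF o)[k]'(by omega) = 'O' := by rw [hFk, if_neg hX, if_pos hcond]
        have hset : PySem.List.pySetD (T ++ o[k] :: o.drop (k + 1)) (k : Int) 'O'
            = (pvF o).take (k + 1) ++ o.drop (k + 1) := by
          rw [PySem.List.pySetD_natCast]
          rw [List.set_append, if_neg (by omega)]
          rw [htk, Nat.sub_self]
          rw [htksucc, hFkO]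
          simp only [List.append_assoc, List.singleton_append, List.append_cancel_left_eq]
          exact List.set_cons_zero ..
        rw [hset, hcast, ih (k + 1) (w + 1) (by omega)]
        rw [hcnt, hFkO]
        norm_num
        ring
      · have hb : (T.contains 'X' && (o.drop (k + 1)).contains 'X') = false := by
          rw [Bool.and_eq_false_iff]
          by_cases h1 : 'X' ∈ o.take k
          · right
            rw [← Bool.not_eq_true, List.contains_iff_mem]
            intro h2
            exact hcond ⟨h1, h2⟩
          · left
            rw [← Bool.not_eq_true, List.contains_iff_mem, hT, pv_mem_take_F o k]
            exact h1
        rw [if_neg (by rw [hb]; decide)]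
        have hFkS : (pvF o)[k]'(by omega) = ' ' := by rw [hFk, if_neg hX, if_neg hcond]
        have hstate : T ++ o[k] :: o.drop (k + 1) = (pvF o).take (k + 1) ++ o.drop (k + 1) := by
          rw [htksucc, hFkS, ho']; simp
        rw [hstate, hcast, ih (k + 1) w (by omega)]
        rw [hcnt, hFkS]
        norm_num
-- ---- A's row loop ----

lemma pv_rowA_core (input : List Int) (d : PySem.Dict Int (List Char)) (w row : Int)
    (hd : d.getD row [] = []) :
    (PySem.List.pyRange 0 (PySem.List.len
          (input.foldl (fun acc digit => if digit ≥ row then acc ++ ['X'] else acc ++ [' ']) (d.getD row []))) 1).foldl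
        (fun (q : List Char × Int) x =>
          if PySem.List.pyGetD q.1 x ' ' = 'X' then q
          else if (PySem.List.slice q.1 none (some x)).contains 'X'
                  && (PySem.List.slice q.1 (some (x + 1)) none).contains 'X' then
            (PySem.List.pySetD q.1 x 'O', q.2 + 1)
          else q)
        (input.foldl (fun acc digit => if digit ≥ row then acc ++ ['X'] else acc ++ [' ']) (d.getD row []), w)
      = (pvF (pvRowO input row), w + pvW input row) := by
  rw [hd]
  have hf : (fun (acc : List Char) (digit : Int) => if digit ≥ row then acc ++ ['X'] else acc ++ [' '])
      = (fun acc digit => acc ++ [(fun (d : Int) => if d ≥ row then 'X' else ' ') digit]) := by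
    funext acc digit
    by_cases h : digit ≥ row <;> simp [h]
  rw [hf, PySem.List.foldl_append_singleton_eq_map, List.nil_append]
  rw [show List.map (fun (d : Int) => if d ≥ row then 'X' else ' ') input = pvRowO input row from rfl]
  have ho : ∀ c ∈ pvRowO input row, c = 'X' ∨ c = ' ' := by
    intro c hc
    rcases List.mem_map.1 hc with ⟨d', _, rfl⟩
    split_ifs <;> simp
  have hw := pv_water_aux (pvRowO input row) ho (pvRowO input row).length 0 w (by omega)
  simp only [Nat.cast_zero, List.take_zero, List.nil_append, List.drop_zero] at hw
  rw [PySem.List.len_eq, hw]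
  simp only [pvW]

lemma pv_rowA_fold (input : List Int) :
    ∀ (ks : List Int) (d : PySem.Dict Int (List Char)) (w : Int), ks.Nodup →
      (∀ k ∈ ks, d.getD k [] = []) →
      (ks.foldl (fun (st : PySem.Dict Int (List Char) × Int) row =>
        let cs0 := input.foldl
            (fun acc digit => if digit ≥ row then acc ++ ['X'] else acc ++ [' '])
            (st.1.getD row [])
        let cw := (PySem.List.pyRange 0 (PySem.List.len cs0) 1).foldl
            (fun (q : List Char × Int) x =>
              if PySem.List.pyGetD q.1 x ' ' = 'X' then q
              else if (PySem.List.slice q.1 none (some x)).contains 'X'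
                      && (PySem.List.slice q.1 (some (x + 1)) none).contains 'X' then
                (PySem.List.pySetD q.1 x 'O', q.2 + 1)
              else q)
            (cs0, st.2)
        (st.1.insert row (PySem.Chars.join [' '] (cw.1.map (fun c => [c]))), cw.2)) (d, w)).2
          = w + (ks.map (pvW input)).sum
      ∧ ∀ j, (ks.foldl (fun (st : PySem.Dict Int (List Char) × Int) row =>
        let cs0 := input.foldl
            (fun acc digit => if digit ≥ row then acc ++ ['X'] else acc ++ [' '])
            (st.1.getD row [])
        let cw := (PySem.List.pyRange 0 (PySem.List.len cs0) 1).foldl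
            (fun (q : List Char × Int) x =>
              if PySem.List.pyGetD q.1 x ' ' = 'X' then q
              else if (PySem.List.slice q.1 none (some x)).contains 'X'
                      && (PySem.List.slice q.1 (some (x + 1)) none).contains 'X' then
                (PySem.List.pySetD q.1 x 'O', q.2 + 1)
              else q)
            (cs0, st.2)
        (st.1.insert row (PySem.Chars.join [' '] (cw.1.map (fun c => [c]))), cw.2)) (d, w)).1.getD j []
          = if j ∈ ks then pvRow input j else d.getD j [] := by
  intro ks
  induction ks with
  | nil =>
    intro d w _ _
    constructor
    · simp
    · intro j; simp
  | cons k ks ih =>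
    intro d w hnd hd
    rw [List.foldl_cons]
    simp only []
    rw [pv_rowA_core input d w k (hd k List.mem_cons_self)]
    simp only []
    rw [show PySem.Chars.join [' '] ((pvF (pvRowO input k)).map (fun c => [c])) = pvRow input k from rfl]
    have hnd' : ks.Nodup := (List.nodup_cons.1 hnd).2
    have hknot : k ∉ ks := (List.nodup_cons.1 hnd).1
    have hd' : ∀ k' ∈ ks, (d.insert k (pvRow input k)).getD k' [] = [] := by
      intro k' hk'
      rw [PySem.Dict.getD_insert, if_neg (fun (h : k' = k) => hknot (h ▸ hk'))]
      exact hd k' (List.mem_cons_of_mem _ hk')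
    obtain ⟨ih2, ih1⟩ := ih (d.insert k (pvRow input k)) (w + pvW input k) hnd' hd'
    constructor
    · rw [ih2, List.map_cons, List.sum_cons]
      ring
    · intro j
      rw [ih1 j]
      by_cases hj : j ∈ ks
      · simp [hj]
      · rw [if_neg hj, PySem.Dict.getD_insert]
        by_cases hjk : j = k
        · subst hjk
          simp
        · simp [hjk, List.mem_cons, hj]

-- ---- A's final while loop ----

lemma pv_whileA (g : PySem.Dict Int (List Char)) :
    ∀ (n : Nat) (i : Int) (acc : List Char),
      pvWhileA g n i acc
        = acc ++ PySem.Chars.join ['\n'] ((List.range (n + 1)).map (fun (k : Nat) => g.getD (i - (k : Int)) [])) := by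
  intro n
  induction n with
  | zero =>
    intro i acc
    simp [pvWhileA, List.range_succ, PySem.Chars.join_singleton]
  | succ n ih =>
    intro i acc
    rw [show pvWhileA g (n + 1) i acc = pvWhileA g n (i - 1) (acc ++ g.getD i [] ++ ['\n']) from rfl]
    rw [ih]
    have h1 : List.range (n + 1 + 1) = 0 :: (List.range (n + 1)).map Nat.succ := List.range_succ_eq_map
    rw [h1]
    have h2 : ((List.range (n + 1)).map Nat.succ).map (fun (k : Nat) => g.getD (i - (k : Int)) [])
        = (List.range (n + 1)).map (fun (k : Nat) => g.getD (i - 1 - (k : Int)) []) := by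
      rw [List.map_map]
      refine List.map_congr_left ?_
      intro a _
      simp only [Function.comp]
      congr 1
      push_cast
      ring
    rw [List.map_cons, h2]
    rcases hbr : (List.range (n + 1)).map (fun (k : Nat) => g.getD (i - 1 - (k : Int)) []) with _ | ⟨b, rest⟩
    · exfalso; simpa using congrArg List.length hbr
    · rw [PySem.Chars.join_cons_cons]
      simp
-- ---- B's row ----

lemma pv_rowB (input : List Int) (r : Int) (w : Int) :
    ((PySem.List.enumerate (input.map (fun v => decide (v ≥ r))) 0).foldl
        (fun (q : List Char × Int) p =>
          if p.2 then (q.1 ++ ['X'], q.2)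
          else if ((if (input.map (fun v => decide (v ≥ r))).contains true then
                    (((PySem.List.index? (input.map (fun v => decide (v ≥ r))) true).getD 0 : Nat),
                     PySem.List.len (input.map (fun v => decide (v ≥ r))) - 1 -
                       ((PySem.List.index? (input.map (fun v => decide (v ≥ r))).reverse true).getD 0 : Nat))
                  else (-1, -1) : Int × Int)).1 ≤ p.1
               ∧ p.1 ≤ ((if (input.map (fun v => decide (v ≥ r))).contains true then
                    (((PySem.List.index? (input.map (fun v => decide (v ≥ r))) true).getD 0 : Nat),
                     PySem.List.len (input.map (fun v => decide (v ≥ r))) - 1 -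
                       ((PySem.List.index? (input.map (fun v => decide (v ≥ r))).reverse true).getD 0 : Nat))
                  else (-1, -1) : Int × Int)).2 then (q.1 ++ ['O'], q.2 + 1)
          else (q.1 ++ [' '], q.2))
        ([], w))
      = (pvF (pvRowO input r), w + pvW input r) := by
  set mask := input.map (fun v => decide (v ≥ r)) with hmask
  set o := pvRowO input r with ho
  set LR : Int × Int := (if mask.contains true then
                    (((PySem.List.index? mask true).getD 0 : Nat),
                     PySem.List.len mask - 1 -
                       ((PySem.List.index? mask.reverse true).getD 0 : Nat))
                  else (-1, -1) : Int × Int) with hLR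
  have hmlen : mask.length = input.length := by simp [hmask]
  have holen : o.length = input.length := by simp [ho, pvRowO]
  have hXi : ∀ (i : Nat) (hi : i < input.length),
      (o[i]'(by omega) = 'X' ↔ mask[i]'(by omega) = true) := by
    intro i hi
    simp only [ho, pvRowO, hmask, List.getElem_map]
    by_cases h : input[i] ≥ r
    · simp [h]
    · simp [h]
  -- split the fold into the char list and the counter
  have hstep : (fun (q : List Char × Int) (p : Int × Bool) =>
          if p.2 then (q.1 ++ ['X'], q.2)
          else if LR.1 ≤ p.1 ∧ p.1 ≤ LR.2 then (q.1 ++ ['O'], q.2 + 1)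
          else (q.1 ++ [' '], q.2))
      = (fun q p => (q.1 ++ [if p.2 then 'X' else if LR.1 ≤ p.1 ∧ p.1 ≤ LR.2 then 'O' else ' '],
                     q.2 + (if p.2 then 0 else if LR.1 ≤ p.1 ∧ p.1 ≤ LR.2 then 1 else 0))) := by
    funext q p
    split_ifs <;> simp
  rw [hstep]
  rw [PySem.List.foldl_prod_mk
        (f := fun a (p : Int × Bool) => a ++ [if p.2 then 'X' else if LR.1 ≤ p.1 ∧ p.1 ≤ LR.2 then 'O' else ' '])
        (g := fun a (p : Int × Bool) => a + (if p.2 then 0 else if LR.1 ≤ p.1 ∧ p.1 ≤ LR.2 then 1 else 0))]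
  rw [PySem.List.foldl_append_singleton_eq_map, List.nil_append]
  rw [show (fun (a : Int) (p : Int × Bool) => a + (if p.2 then 0 else if LR.1 ≤ p.1 ∧ p.1 ≤ LR.2 then 1 else 0))
      = (fun a p => a + (fun (p : Int × Bool) => if p.2 then 0 else if LR.1 ≤ p.1 ∧ p.1 ≤ LR.2 then 1 else 0) p) from rfl]
  rw [PySem.List.foldl_add]
  -- the char list equals pvF o
  have hchars : (PySem.List.enumerate mask 0).map
      (fun (p : Int × Bool) => if p.2 then 'X' else if LR.1 ≤ p.1 ∧ p.1 ≤ LR.2 then 'O' else ' ')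
      = pvF o := by
    apply List.ext_getElem
    · simp [pv_F_length, PySem.List.length_enumerate, hmlen, holen]
    intro j h1 h2
    have hj : j < input.length := by
      simpa [PySem.List.length_enumerate, hmlen] using h1
    rw [List.getElem_map, PySem.List.getElem_enumerate]
    rw [pv_F_getElem o j (by omega)]
    simp only [zero_add]
    by_cases hm : mask[j]'(by omega) = true
    · rw [if_pos hm, if_pos ((hXi j hj).2 hm)]
    · rw [if_neg hm, if_neg (fun hx => hm ((hXi j hj).1 hx))]
      -- the interval test matches the two-sided membership test
      have hiff : (LR.1 ≤ (j : Int) ∧ (j : Int) ≤ LR.2)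
          ↔ ('X' ∈ o.take j ∧ 'X' ∈ o.drop (j + 1)) := by
        by_cases hct : mask.contains true
        · obtain ⟨l, hl⟩ : ∃ l, PySem.List.index? mask true = some l := by
            have := (PySem.List.index?_isSome_iff (xs := mask) (v := true)).2
              (by rwa [List.contains_iff_mem] at hct)
            exact Option.isSome_iff_exists.1 this
          obtain ⟨l₂, hl₂⟩ : ∃ l₂, PySem.List.index? mask.reverse true = some l₂ := by
            have := (PySem.List.index?_isSome_iff (xs := mask.reverse) (v := true)).2
              (by rw [List.mem_reverse]; rwa [List.contains_iff_mem] at hct)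
            exact Option.isSome_iff_exists.1 this
          obtain ⟨hlk, hlv, hlmin⟩ := PySem.List.getElem_of_index?_eq_some hl
          obtain ⟨hl₂k, hl₂v, hl₂min⟩ := PySem.List.getElem_of_index?_eq_some hl₂
          rw [List.length_reverse] at hl₂k
          have hl₂v' : mask[mask.length - 1 - l₂]'(by omega) = true := by
            rw [← hl₂v, List.getElem_reverse]
          set r' := mask.length - 1 - l₂ with hr'
          have hrmax : ∀ (i : Nat) (hi : i < mask.length), r' < i → mask[i]'(by omega) = false := by
            intro i hi hri
            have hjj : mask.length - 1 - i < l₂ := by omega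
            have hne := hl₂min _ hjj
            rw [List.getElem_reverse] at hne
            rw [← Bool.not_eq_true]
            intro hit
            apply hne
            rw [pv_getElem_idx_congr mask (show mask.length - 1 - (mask.length - 1 - i) = i from by omega)]
            exact hit
          have hLR1 : LR = ((l : Int), (mask.length : Int) - 1 - (l₂ : Int)) := by
            rw [hLR, if_pos hct, hl, hl₂]
            simp [PySem.List.len_eq]
          have hr'c : ((mask.length : Int) - 1 - (l₂ : Int)) = (r' : Int) := by
            rw [hr']; omega
          rw [hLR1, hr'c]
          have htake : 'X' ∈ o.take j ↔ l < j := by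
            rw [List.mem_take_iff_getElem]
            constructor
            · rintro ⟨i, hi, hiv⟩
              have hij : i < j := lt_of_lt_of_le hi (min_le_left _ _)
              have hi' : i < input.length := by
                have := lt_of_lt_of_le hi (min_le_right _ _); omega
              have hmi : mask[i]'(by omega) = true := (hXi i hi').1 hiv
              have hli : l ≤ i := by
                by_contra hcon
                exact hlmin i (by omega) hmi
              omega
            · intro hlj
              refine ⟨l, by omega, (hXi l (by omega)).2 hlv⟩
          have hdrop : 'X' ∈ o.drop (j + 1) ↔ j < r' := by
            rw [List.mem_drop_iff_getElem]
            constructor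
            · rintro ⟨i, hi, hiv⟩
              have hi' : j + 1 + i < input.length := by omega
              have hmi : mask[j + 1 + i]'(by omega) = true := (hXi _ hi').1 hiv
              by_contra hjr
              have : r' < j + 1 + i := by omega
              rw [hrmax _ (by omega) this] at hmi
              exact Bool.false_ne_true hmi
            · intro hjr
              refine ⟨r' - (j + 1), by omega, ?_⟩
              rw [pv_getElem_idx_congr o (show j + 1 + (r' - (j + 1)) = r' from by omega)]
              exact (hXi r' (by omega)).2 hl₂v'
          constructor
          · rintro ⟨h1', h2'⟩
            replace h1' : (l : Int) ≤ (j : Int) := h1'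
            replace h2' : (j : Int) ≤ (r' : Int) := h2'
            have hlj : l ≤ j := by exact_mod_cast h1'
            have hjr : j ≤ r' := by exact_mod_cast h2'
            have hlne : l ≠ j := by
              intro h; subst h; exact hm hlv
            have hrne : j ≠ r' := by
              intro h
              have h1 : mask[j]? = some true := by
                rw [h, List.getElem?_eq_getElem (show r' < mask.length by omega), hl₂v']
              rw [List.getElem?_eq_getElem (show j < mask.length by omega)] at h1
              exact hm (by injection h1)
            exact ⟨htake.2 (by omega), hdrop.2 (by omega)⟩
          · rintro ⟨h1', h2'⟩
            have hlj : l < j := htake.1 h1'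
            have hjr : j < r' := hdrop.1 h2'
            exact ⟨show (l : Int) ≤ (j : Int) by exact_mod_cast Nat.le_of_lt hlj,
                   show (j : Int) ≤ (r' : Int) by exact_mod_cast Nat.le_of_lt hjr⟩
        · -- no bar in this row: no water either
          rw [hLR, if_neg hct]
          constructor
          · rintro ⟨h1', h2'⟩
            replace h2' : (j : Int) ≤ (-1 : Int) := h2'
            exfalso
            have : (0 : Int) ≤ (j : Int) := Int.natCast_nonneg j
            omega
          · rintro ⟨h1', h2'⟩
            exfalso
            rcases List.mem_take_iff_getElem.1 h1' with ⟨i, hi, hiv⟩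
            have hi' : i < input.length := by
              have := lt_of_lt_of_le hi (min_le_right _ _); omega
            have : mask[i]'(by omega) = true := (hXi i hi').1 hiv
            have hmem : true ∈ mask := by
              rw [← this]; exact List.getElem_mem _
            rw [← List.contains_iff_mem] at hmem
            exact hct hmem
      by_cases hc : 'X' ∈ o.take j ∧ 'X' ∈ o.drop (j + 1)
      · rw [if_pos (hiff.2 hc), if_pos hc]
      · rw [if_neg (fun h => hc (hiff.1 h)), if_neg hc]
  rw [hchars]
  -- the counter adds the number of 'O' cells
  have hcount : ((PySem.List.enumerate mask 0).map
      (fun (p : Int × Bool) => if p.2 then 0 else if LR.1 ≤ p.1 ∧ p.1 ≤ LR.2 then 1 else (0 : Int))).sum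
      = pvW input r := by
    have hpt : ((PySem.List.enumerate mask 0).map
        (fun (p : Int × Bool) => if p.2 then 0 else if LR.1 ≤ p.1 ∧ p.1 ≤ LR.2 then 1 else (0 : Int)))
        = ((PySem.List.enumerate mask 0).map
          (fun (p : Int × Bool) => if p.2 then 'X' else if LR.1 ≤ p.1 ∧ p.1 ≤ LR.2 then 'O' else ' ')).map
            (fun c => if c = 'O' then (1 : Int) else 0) := by
      rw [List.map_map]
      refine List.map_congr_left ?_
      intro p _
      simp only [Function.comp]
      rcases p with ⟨i, b⟩
      cases b <;> by_cases hc2 : LR.1 ≤ i ∧ i ≤ LR.2 <;> simp [hc2]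
    rw [hpt, hchars]
    have := PySem.List.sum_map_ite_one_zero (fun c => c == 'O') (pvF o)
    simp only [beq_iff_eq] at this
    rw [this]
    simp only [pvW, List.count_eq_countP, ho]
  rw [hcount]
-- ===== VERDICT (by name: the statement is the Claim_ definition above) =====
theorem graph_gen_spec : Claim_equal_graph_gen := by
  intro input hdom hpre
  unfold Spec_graph_gen
  obtain ⟨x, xs, rfl⟩ : ∃ x xs, input = x :: xs := by
    cases input with
    | nil => exact absurd rfl hpre
    | cons x xs => exact ⟨x, xs, rfl⟩
  unfold graph_gen graph_gen_alt
  simp only [List.head?_cons, Option.getD_some, PySem.List.len_eq]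
  rw [show (fun (p : Int × Int) (y : Int) =>
        if PySem.List.pyGetD (x :: xs) y 0 < p.1 then (PySem.List.pyGetD (x :: xs) y 0, p.2)
        else if PySem.List.pyGetD (x :: xs) y 0 > p.2 then (p.1, PySem.List.pyGetD (x :: xs) y 0)
        else p)
      = (fun acc j => (fun (p : Int × Int) v => if v < p.1 then (v, p.2) else if v > p.2 then (p.1, v) else p)
          acc (PySem.List.pyGetD (x :: xs) j 0)) from rfl]
  rw [PySem.List.foldl_pyRange_zero_pyGetD' (x :: xs) 0
        (fun (p : Int × Int) v => if v < p.1 then (v, p.2) else if v > p.2 then (p.1, v) else p) (x, 0)]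
  rw [pv_lowhigh x xs, pv_min?_cons x xs, pv_max?_cons x xs]
  simp only [Option.getD_some]
  set lo := xs.foldl min x with hlo
  set hi := max 0 (xs.foldl max x) with hhi
  have hlohi : lo ≤ hi := by
    have h1 := (pv_foldl_min_le xs x).1
    have h2 := (PySem.List.le_foldl_max xs x).1
    have h3 : xs.foldl max x ≤ hi := le_max_right _ _
    omega
  -- A side: the dictionary of rows
  rw [pv_keys_range lo (hi + 1)]
  have hd0 : ∀ k ∈ PySem.List.pyRange lo (hi + 1) 1,
      ((PySem.List.pyRange lo (hi + 1) 1).foldl (fun d x => d.insert x ([] : List Char)) PySem.Dict.empty).getD k [] = [] := by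
    intro k _
    exact pv_graph0_getD _ _ (fun j => by simp [PySem.Dict.getD_empty]) k
  obtain ⟨hw2, hg⟩ := pv_rowA_fold (x :: xs) (PySem.List.pyRange lo (hi + 1) 1)
    ((PySem.List.pyRange lo (hi + 1) 1).foldl (fun d x => d.insert x ([] : List Char)) PySem.Dict.empty)
    0 (PySem.List.nodup_pyRange_one lo (hi + 1)) hd0
  simp only [PySem.List.len_eq] at hw2 hg
  rw [hw2, pv_whileA]
  simp only [hg]
  -- B side: one clean step per row
  have hBstep : (fun (st : List (List Char) × Int) r =>
        let mask := (x :: xs).map (fun v => decide (v ≥ r))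
        let LR : Int × Int :=
          if mask.contains true then
            (((PySem.List.index? mask true).getD 0 : Nat),
             PySem.List.len mask - 1 - ((PySem.List.index? mask.reverse true).getD 0 : Nat))
          else (-1, -1)
        let cw := (PySem.List.enumerate mask 0).foldl
            (fun (q : List Char × Int) p =>
              if p.2 then (q.1 ++ ['X'], q.2)
              else if LR.1 ≤ p.1 ∧ p.1 ≤ LR.2 then (q.1 ++ ['O'], q.2 + 1)
              else (q.1 ++ [' '], q.2))
            ([], st.2)
        (st.1 ++ [PySem.Chars.join [' '] (cw.1.map (fun c => [c]))], cw.2))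
      = (fun (st : List (List Char) × Int) r => (st.1 ++ [pvRow (x :: xs) r], st.2 + pvW (x :: xs) r)) := by
    funext st r
    simp only []
    rw [pv_rowB (x :: xs) r st.2]
    rfl
  simp only [PySem.List.len_eq] at hBstep
  rw [hBstep]
  rw [PySem.List.foldl_prod_mk (f := fun a r => a ++ [pvRow (x :: xs) r]) (g := fun a r => a + pvW (x :: xs) r)]
  rw [PySem.List.foldl_append_singleton_eq_map, List.nil_append]
  rw [show (fun (a : Int) r => a + pvW (x :: xs) r)
      = (fun (a : Int) r => a + (fun r => pvW (x :: xs) r) r) from rfl]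
  rw [PySem.List.foldl_add]
  -- the two row lists coincide
  have hrange : PySem.List.pyRange hi (lo - 1) (-1)
      = (List.range ((hi - lo).toNat + 1)).map (fun (k : Nat) => hi - (k : Int)) := by
    rw [PySem.List.pyRange_neg_one]
    rw [show (hi - (lo - 1)).toNat = (hi - lo).toNat + 1 from by omega]
  have hstr : (List.range ((hi - lo).toNat + 1)).map
        (fun (k : Nat) => if hi - (k : Int) ∈ PySem.List.pyRange lo (hi + 1) 1
          then pvRow (x :: xs) (hi - (k : Int))
          else ((PySem.List.pyRange lo (hi + 1) 1).foldl
              (fun d x => d.insert x ([] : List Char)) PySem.Dict.empty).getD (hi - (k : Int)) [])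
      = (PySem.List.pyRange hi (lo - 1) (-1)).map (fun r => pvRow (x :: xs) r) := by
    rw [hrange, List.map_map]
    refine List.map_congr_left ?_
    intro k hk
    have hk' : k < (hi - lo).toNat + 1 := List.mem_range.1 hk
    have hmem : hi - (k : Int) ∈ PySem.List.pyRange lo (hi + 1) 1 := by
      rw [PySem.List.mem_pyRange_one]
      omega
    simp only [Function.comp]
    rw [if_pos hmem]
  rw [hstr]
  -- the two water sums coincide
  have hsum : ((PySem.List.pyRange hi (lo - 1) (-1)).map (fun r => pvW (x :: xs) r)).sum
      = ((PySem.List.pyRange lo (hi + 1) 1).map (pvW (x :: xs))).sum := by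
    rw [PySem.List.pyRange_neg_one_eq_reverse, show lo - 1 + 1 = lo from by ring]
    rw [List.map_reverse, List.sum_reverse]
  rw [hsum]
  simp
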